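-- pv_equiv track=rewrite | github.com/GuoLabUCSD/SINE | supplemental/prepare_netmhcpan.py | create_peptides
-- ===== SOURCE A (Python) =====
-- def create_peptides(mhc, short_seq, junc_aa_pos):
--     '''Creates peptides spanning junction from buffered sequence'''
--     kmer_list = [8,9,10,11] if mhc == 'I' else [15]
--     peptides = []
--
--     for kmer in kmer_list:
--         for i in range(len(short_seq) - (kmer-1)):
--             start = i
--             end = i + kmer
--             # check if spans junctions
--             if start <= junc_aa_pos[0] and junc_aa_pos[1] < end:
--                 peptides.append(short_seq[start:end])
--     return peptides
-- ===== SOURCE B (Python) =====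
-- def create_peptides(mhc, short_seq, junc_aa_pos):
--     '''Creates peptides spanning junction from buffered sequence'''
--     j0, j1 = junc_aa_pos
--     n = len(short_seq)
--
--     def window(kmer):
--         # start must satisfy: 0 <= start <= n - kmer, start <= j0, j1 < start + kmer
--         low = max(0, j1 - kmer + 1)
--         high = min(n - kmer, j0)
--         return [short_seq[s:s + kmer] for s in range(low, high + 1)]
--
--     kmers = [8, 9, 10, 11] if mhc == 'I' else [15]
--     return [pep for kmer in kmers for pep in window(kmer)]
-- ===== Notes on version B (the rewrite author's own statement) =====
-- stated objective: alternative
-- what changed: B computes each kmer's valid start window [max(0,junc[1]-kmer+1), min(len-kmer,junc[0])] in closed form and slices only those positions via a flat comprehension, instead of scanning every position of the sequence and testing the spanning condition with an accumulator loop.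
import Mathlib
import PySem

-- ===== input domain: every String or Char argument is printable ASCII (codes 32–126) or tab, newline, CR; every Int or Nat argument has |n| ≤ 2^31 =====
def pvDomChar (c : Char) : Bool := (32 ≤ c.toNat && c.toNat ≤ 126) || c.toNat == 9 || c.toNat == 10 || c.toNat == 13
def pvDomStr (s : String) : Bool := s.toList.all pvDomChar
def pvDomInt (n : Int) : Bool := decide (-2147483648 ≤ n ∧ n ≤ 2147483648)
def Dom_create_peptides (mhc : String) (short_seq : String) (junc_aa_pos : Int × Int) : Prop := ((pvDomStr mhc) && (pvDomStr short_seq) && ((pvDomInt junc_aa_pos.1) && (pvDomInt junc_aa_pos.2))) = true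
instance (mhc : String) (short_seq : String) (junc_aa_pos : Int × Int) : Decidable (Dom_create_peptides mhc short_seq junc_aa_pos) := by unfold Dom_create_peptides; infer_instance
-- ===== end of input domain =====

-- B computes each kmer's valid start window [max(0,j1-kmer+1), min(len-kmer,j0)] in closed form
-- and slices only those positions (a flat comprehension) instead of scanning every position and
-- testing the spanning condition with an accumulator loop (alternative: does less work per kmer).

-- ===== PORT A =====
def create_peptides (mhc : String) (short_seq : String) (junc_aa_pos : Int × Int) : List String :=
  let kmer_list : List Int := if mhc = "I" then [8, 9, 10, 11] else [15]
  kmer_list.foldl (fun peptides kmer =>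
    (PySem.List.pyRange 0 (PySem.Str.len short_seq - (kmer - 1)) 1).foldl (fun peptides i =>
      let start := i
      let stop := i + kmer
      if start ≤ junc_aa_pos.1 ∧ junc_aa_pos.2 < stop then
        peptides ++ [PySem.Str.slice short_seq (some start) (some stop)]
      else peptides) peptides) []

-- ===== PORT B =====
-- helper: the per-kmer window of valid starts, sliced ('window' in Source B)
def cpWindow (short_seq : String) (j0 j1 n kmer : Int) : List String :=
  let low := max 0 (j1 - kmer + 1)
  let high := min (n - kmer) j0
  (PySem.List.pyRange low (high + 1) 1).map
    (fun s => PySem.Str.slice short_seq (some s) (some (s + kmer)))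

def create_peptides_alt (mhc : String) (short_seq : String) (junc_aa_pos : Int × Int) : List String :=
  let j0 := junc_aa_pos.1
  let j1 := junc_aa_pos.2
  let n := PySem.Str.len short_seq
  (if mhc = "I" then ([8, 9, 10, 11] : List Int) else [15]).flatMap
    (cpWindow short_seq j0 j1 n)

-- ===== PRECONDITION & SPEC =====
def Spec_create_peptides (mhc : String) (short_seq : String) (junc_aa_pos : Int × Int) (out : List String) : Prop := out = create_peptides_alt mhc short_seq junc_aa_pos
instance (mhc : String) (short_seq : String) (junc_aa_pos : Int × Int) (out : List String) : Decidable (Spec_create_peptides mhc short_seq junc_aa_pos out) := by unfold Spec_create_peptides; infer_instance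

-- ===== CLAIM =====
def Claim_equal_create_peptides : Prop := ∀ (mhc : String) (short_seq : String) (junc_aa_pos : Int × Int), Dom_create_peptides mhc short_seq junc_aa_pos → Spec_create_peptides mhc short_seq junc_aa_pos (create_peptides mhc short_seq junc_aa_pos)

-- ===== LEMMAS AND PROOFS =====

-- filtering range(a,b) by a closed interval [c,d] is the clipped range
theorem pv_filter_pyRange_interval (a b c d : Int) :
    (PySem.List.pyRange a b 1).filter (fun x => decide (c ≤ x ∧ x ≤ d))
      = PySem.List.pyRange (max a c) (min b (d + 1)) 1 := by
  by_cases hab : b ≤ a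
  · rw [PySem.List.pyRange_one_eq_nil hab, PySem.List.pyRange_one_eq_nil (by omega)]
    rfl
  · rw [not_le] at hab
    rw [PySem.List.pyRange_one_cons hab]
    have ih := pv_filter_pyRange_interval (a + 1) b c d
    by_cases hp : c ≤ a ∧ a ≤ d
    · have h1 : max a c = a := by omega
      have h2 : max (a + 1) c = a + 1 := by omega
      have h3 : a < min b (d + 1) := by omega
      simp only [List.filter_cons, hp, if_pos, and_self, decide_true]
      rw [ih, h2, h1, PySem.List.pyRange_one_cons h3]
    · have : (decide (c ≤ a ∧ a ≤ d)) = false := by simp [hp]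
      simp only [List.filter_cons, this]
      rw [ih]
      by_cases hc : a < c
      · have : max a c = c := by omega
        have : max (a + 1) c = c := by omega
        simp_all
      · rw [PySem.List.pyRange_one_eq_nil (by omega), PySem.List.pyRange_one_eq_nil (by omega)]
        simp
termination_by (b - a).toNat
decreasing_by omega

-- A's inner scan-and-test loop produces exactly B's window, appended to the accumulator
theorem pv_inner_eq_window (short_seq : String) (j0 j1 kmer : Int) (acc : List String) :
    (PySem.List.pyRange 0 (PySem.Str.len short_seq - (kmer - 1)) 1).foldl (fun peptides i =>
        let start := i
        let stop := i + kmer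
        if start ≤ j0 ∧ j1 < stop then
          peptides ++ [PySem.Str.slice short_seq (some start) (some stop)]
        else peptides) acc
      = acc ++ cpWindow short_seq j0 j1 (PySem.Str.len short_seq) kmer := by
  rw [PySem.List.foldl_append_ite (p := fun i => i ≤ j0 ∧ j1 < i + kmer)
        (f := fun i => PySem.Str.slice short_seq (some i) (some (i + kmer)))]
  unfold cpWindow
  have hcong : (PySem.List.pyRange 0 (PySem.Str.len short_seq - (kmer - 1)) 1).filter
        (fun x => decide (x ≤ j0 ∧ j1 < x + kmer))
      = (PySem.List.pyRange 0 (PySem.Str.len short_seq - (kmer - 1)) 1).filter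
        (fun x => decide (j1 - kmer + 1 ≤ x ∧ x ≤ j0)) := by
    apply List.filter_congr
    intro x _
    simp only [decide_eq_decide]
    omega
  rw [hcong, pv_filter_pyRange_interval]
  have hmin : min (PySem.Str.len short_seq - (kmer - 1)) (j0 + 1)
      = min (PySem.Str.len short_seq - kmer) j0 + 1 := by omega
  rw [hmin]

-- ===== VERDICT =====
theorem create_peptides_spec : Claim_equal_create_peptides := by
  intro mhc short_seq junc_aa_pos _
  unfold Spec_create_peptides create_peptides create_peptides_alt
  have h : ∀ (l : List Int), l.foldl (fun peptides kmer =>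
      (PySem.List.pyRange 0 (PySem.Str.len short_seq - (kmer - 1)) 1).foldl (fun peptides i =>
        let start := i
        let stop := i + kmer
        if start ≤ junc_aa_pos.1 ∧ junc_aa_pos.2 < stop then
          peptides ++ [PySem.Str.slice short_seq (some start) (some stop)]
        else peptides) peptides) []
      = l.flatMap (cpWindow short_seq junc_aa_pos.1 junc_aa_pos.2 (PySem.Str.len short_seq)) := by
    intro l
    have hc : l.foldl (fun peptides kmer =>
        (PySem.List.pyRange 0 (PySem.Str.len short_seq - (kmer - 1)) 1).foldl (fun peptides i =>
          let start := i
          let stop := i + kmer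
          if start ≤ junc_aa_pos.1 ∧ junc_aa_pos.2 < stop then
            peptides ++ [PySem.Str.slice short_seq (some start) (some stop)]
          else peptides) peptides) []
        = l.foldl (fun acc kmer => acc ++ cpWindow short_seq junc_aa_pos.1 junc_aa_pos.2
            (PySem.Str.len short_seq) kmer) [] := by
      apply PySem.List.foldl_congr_mem
      intro acc kmer _
      exact pv_inner_eq_window short_seq junc_aa_pos.1 junc_aa_pos.2 kmer acc
    rw [hc, PySem.List.foldl_append_eq_flatMap]
    simp
  exact h _
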